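-- pv_equiv track=rewrite | github.com/LightningDocs/monthly-double-checker-v2 | mongo_db.py | copy_app_user_types
-- ===== SOURCE A (Python) =====
-- def copy_app_user_types(previous_document: dict, new_document: dict) -> dict:
--     """Copies the app.LD_userType attributes from a previous document into a new document.
--
--     Args:
--         previous_document (dict): A Knackly record-like document
--         new_document (dict): A Knackly record-like document
--
--     Returns:
--         dict: The new, modified document.
--     """
--     user_type_map = {
--         app["name"]: app.get("LD_userType") for app in previous_document.get("apps", {})
--     }
--
--     # Iterate through the apps in the new dict
--     for app in new_document["apps"]:
--         # If the app name exists in the date_map, update the LD_userType in the new document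
--         if app["name"] in user_type_map and user_type_map[app["name"]] is not None:
--             app["LD_userType"] = user_type_map[app["name"]]
--
--     return new_document
-- ===== SOURCE B (Python) =====
-- def copy_app_user_types(previous_document: dict, new_document: dict) -> dict:
--     """Same task, different decomposition: no precomputed map; each new app scans
--     the previous apps directly, remembering the LAST matching app's LD_userType.
--     Mutates new_document in place (like the original) and returns it."""
--     previous_apps = previous_document.get("apps", {})
--     for app in new_document["apps"]:
--         found = False
--         value = None
--         for prev_app in previous_apps:
--             if prev_app["name"] == app["name"]:
--                 found = True
--                 value = prev_app.get("LD_userType")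
--         if found and value is not None:
--             app["LD_userType"] = value
--     return new_document
-- ===== Notes on version B (the rewrite author's own statement) =====
-- stated objective: alternative
-- what changed: Drops the precomputed name->LD_userType dict; each new app directly scans the previous apps list, tracking the last matching app's LD_userType and a found flag, then assigns only if the recorded value is not None.
-- outside the precondition, e.g. on copy_app_user_types({'apps': [{}]}, {'apps': []}): A raises KeyError, B returns {'apps': []}; on copy_app_user_types({}, {}): A raises KeyError, B raises KeyError
import Mathlib
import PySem

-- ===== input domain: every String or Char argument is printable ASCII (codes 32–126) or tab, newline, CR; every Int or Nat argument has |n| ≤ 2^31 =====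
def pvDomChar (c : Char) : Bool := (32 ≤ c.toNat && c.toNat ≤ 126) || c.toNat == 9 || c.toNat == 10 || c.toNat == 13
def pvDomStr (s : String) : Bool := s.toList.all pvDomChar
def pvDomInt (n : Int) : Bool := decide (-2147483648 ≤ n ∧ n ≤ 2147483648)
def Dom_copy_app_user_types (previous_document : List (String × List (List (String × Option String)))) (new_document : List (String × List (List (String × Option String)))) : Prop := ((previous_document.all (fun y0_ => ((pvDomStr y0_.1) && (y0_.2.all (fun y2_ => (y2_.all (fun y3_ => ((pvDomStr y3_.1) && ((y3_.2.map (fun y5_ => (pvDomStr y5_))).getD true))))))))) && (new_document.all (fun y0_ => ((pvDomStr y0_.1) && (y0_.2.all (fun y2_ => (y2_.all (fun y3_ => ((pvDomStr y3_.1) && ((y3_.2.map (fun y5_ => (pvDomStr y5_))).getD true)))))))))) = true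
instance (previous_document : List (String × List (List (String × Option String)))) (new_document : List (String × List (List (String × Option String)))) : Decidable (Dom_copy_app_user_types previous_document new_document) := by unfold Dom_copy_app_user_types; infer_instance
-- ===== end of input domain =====

-- ===== PORT A =====
-- Port of A. Note: the Python A mutates new_document in place; the equivalence
-- proved here is about the RETURN value (my Python B mutates in place the same way).
def copy_app_user_types (previous_document : List (String × List (List (String × Option String)))) (new_document : List (String × List (List (String × Option String)))) : List (String × List (List (String × Option String))) :=
  let prevApps := (PySem.Dict.mk previous_document).getD "apps" []
  let user_type_map : PySem.Dict (Option String) (Option String) :=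
    prevApps.foldl (fun m app =>
      m.insert ((PySem.Dict.mk app).getD "name" none)
               (((PySem.Dict.mk app).get? "LD_userType").getD none)) PySem.Dict.empty
  let newApps := (PySem.Dict.mk new_document).getD "apps" []
  let newApps' := newApps.map (fun app =>
    match user_type_map.get? ((PySem.Dict.mk app).getD "name" none) with
    | some (some v) => ((PySem.Dict.mk app).insert "LD_userType" (some v)).items
    | _ => app)
  ((PySem.Dict.mk new_document).insert "apps" newApps').items

-- ===== PORT B =====
def copy_app_user_types_alt (previous_document : List (String × List (List (String × Option String)))) (new_document : List (String × List (List (String × Option String)))) : List (String × List (List (String × Option String))) :=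
  let prevApps := (PySem.Dict.mk previous_document).getD "apps" []
  let newApps := (PySem.Dict.mk new_document).getD "apps" []
  let newApps' := newApps.map (fun app =>
    let n := (PySem.Dict.mk app).getD "name" none
    let r := prevApps.foldl (fun (acc : Bool × Option String) papp =>
        if (PySem.Dict.mk papp).getD "name" none == n
        then (true, ((PySem.Dict.mk papp).get? "LD_userType").getD none)
        else acc) (false, none)
    if r.1 && r.2.isSome
    then ((PySem.Dict.mk app).insert "LD_userType" r.2).items
    else app)
  ((PySem.Dict.mk new_document).insert "apps" newApps').items

-- ===== PRECONDITION & SPEC =====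
-- Pre_ excludes exactly the inputs where the Python A raises KeyError:
-- a new_document without an "apps" key, or an app (previous or new) without a "name" key.
def Pre_copy_app_user_types (previous_document : List (String × List (List (String × Option String)))) (new_document : List (String × List (List (String × Option String)))) : Prop :=
  (PySem.Dict.mk new_document).contains "apps" = true ∧
  (∀ app ∈ (PySem.Dict.mk previous_document).getD "apps" [], (PySem.Dict.mk app).contains "name" = true) ∧
  (∀ app ∈ (PySem.Dict.mk new_document).getD "apps" [], (PySem.Dict.mk app).contains "name" = true)
instance (previous_document : List (String × List (List (String × Option String)))) (new_document : List (String × List (List (String × Option String)))) : Decidable (Pre_copy_app_user_types previous_document new_document) := by unfold Pre_copy_app_user_types; infer_instance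

def pvWitness_copy_app_user_types : (List (String × List (List (String × Option String)))) × (List (String × List (List (String × Option String)))) :=
  ([("apps", [[("name", some "a"), ("LD_userType", some "x")]])],
   [("apps", [[("name", some "a")], [("name", some "b")]])])

def Spec_copy_app_user_types (previous_document : List (String × List (List (String × Option String)))) (new_document : List (String × List (List (String × Option String)))) (out : List (String × List (List (String × Option String)))) : Prop := out = copy_app_user_types_alt previous_document new_document
instance (previous_document : List (String × List (List (String × Option String)))) (new_document : List (String × List (List (String × Option String)))) (out : List (String × List (List (String × Option String)))) : Decidable (Spec_copy_app_user_types previous_document new_document out) := by unfold Spec_copy_app_user_types; infer_instance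

-- ===== CLAIM (what is proved, stated in full; the proofs are below) =====
def Claim_equal_copy_app_user_types : Prop := ∀ (previous_document : List (String × List (List (String × Option String)))) (new_document : List (String × List (List (String × Option String)))), Dom_copy_app_user_types previous_document new_document → Pre_copy_app_user_types previous_document new_document → Spec_copy_app_user_types previous_document new_document (copy_app_user_types previous_document new_document)

-- ===== LEMMAS AND PROOFS =====

-- Looking up the foldl-built map at n is a left fold over the apps keeping the last match.
theorem pv_get_foldl_insert (n : Option String)
    (apps : List (List (String × Option String)))
    (m0 : PySem.Dict (Option String) (Option String)) :
    (apps.foldl (fun m app =>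
        m.insert ((PySem.Dict.mk app).getD "name" none)
                 (((PySem.Dict.mk app).get? "LD_userType").getD none)) m0).get? n
    = apps.foldl (fun (acc : Option (Option String)) app =>
        if (PySem.Dict.mk app).getD "name" none == n
        then some (((PySem.Dict.mk app).get? "LD_userType").getD none)
        else acc) (m0.get? n) := by
  induction apps generalizing m0 with
  | nil => rfl
  | cons a as ih =>
    simp only [List.foldl_cons, ih, PySem.Dict.get?_insert]
    congr 1
    by_cases h : (PySem.Dict.mk a).getD "name" none = n
    · simp [h]
    · simp [h, Ne.symm h]

-- B's (found, value) pair is the isSome/getD view of the same left fold.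
theorem pv_pair_foldl (n : Option String)
    (apps : List (List (String × Option String)))
    (o : Option (Option String)) :
    apps.foldl (fun (acc : Bool × Option String) papp =>
        if (PySem.Dict.mk papp).getD "name" none == n
        then (true, ((PySem.Dict.mk papp).get? "LD_userType").getD none)
        else acc) (o.isSome, o.getD none)
    = ((apps.foldl (fun (acc : Option (Option String)) app =>
        if (PySem.Dict.mk app).getD "name" none == n
        then some (((PySem.Dict.mk app).get? "LD_userType").getD none)
        else acc) o).isSome,
       (apps.foldl (fun (acc : Option (Option String)) app =>
        if (PySem.Dict.mk app).getD "name" none == n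
        then some (((PySem.Dict.mk app).get? "LD_userType").getD none)
        else acc) o).getD none) := by
  induction apps generalizing o with
  | nil => rfl
  | cons a as ih =>
    simp only [List.foldl_cons]
    by_cases h : (PySem.Dict.mk a).getD "name" none == n
    · simp only [h, if_true]
      exact ih (some _)
    · simp only [h]
      exact ih o

-- ===== VERDICT (by name: the statement is the Claim_ definition above) =====
theorem copy_app_user_types_spec : Claim_equal_copy_app_user_types := by
  intro prev new _ _
  unfold Spec_copy_app_user_types copy_app_user_types copy_app_user_types_alt
  dsimp only
  congr 2
  apply List.map_congr_left
  intro app _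
  simp only [pv_get_foldl_insert, PySem.Dict.get?_empty]
  have hpair := pv_pair_foldl ((PySem.Dict.mk app).getD "name" none)
      ((PySem.Dict.mk prev).getD "apps" []) none
  simp only [Option.isSome_none, Option.getD_none] at hpair
  rw [hpair]
  cases hF : ((PySem.Dict.mk prev).getD "apps" []).foldl (fun (acc : Option (Option String)) a =>
        if (PySem.Dict.mk a).getD "name" none == (PySem.Dict.mk app).getD "name" none
        then some (((PySem.Dict.mk a).get? "LD_userType").getD none)
        else acc) none with
  | none => simp
  | some v => cases v with
    | none => simp
    | some s => simp
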